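-- pv_equiv track=rewrite | github.com/Geek-Yang-Zhe/g-RS | preprocessing/base_process.py | encode_sess
-- ===== SOURCE A (Python) =====
-- from itertools import chain
--
-- def encode_sess(sess_list, merge_sess=False):
--     item2idx = {}
--     encoded_sess_list = []
--     idx = 1
--     for sess in sess_list:
--         for item in sess:
--             if item not in item2idx.keys():
--                 item2idx[item] = idx
--                 idx += 1
--         encoded_sess_list.append([item2idx[item] for item in sess])
--     if merge_sess:
--         encoded_item_list = list(chain.from_iterable(encoded_sess_list))
--         return encoded_item_list, item2idx
--     return encoded_sess_list, item2idx
-- ===== SOURCE B (Python) =====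
-- from itertools import chain
--
-- def encode_sess(sess_list, merge_sess=False):
--     # Global sort-based ranking: compute each item's first-occurrence position in the
--     # flattened stream, rank items by that position (ids 1..k), then encode by lookup.
--     flat = list(chain.from_iterable(sess_list))
--     first_pos = {item: pos for pos, item in reversed(list(enumerate(flat)))}
--     order = sorted(first_pos, key=first_pos.get)
--     item2idx = {item: idx for idx, item in enumerate(order, start=1)}
--     encoded_sess_list = [[item2idx[item] for item in sess] for sess in sess_list]
--     if merge_sess:
--         return list(chain.from_iterable(encoded_sess_list)), item2idx
--     return encoded_sess_list, item2idx
-- ===== Notes on version B (the rewrite author's own statement) =====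
-- stated objective: alternative
-- what changed: B replaces A's incremental first-seen counter dict with a global strategy: flatten the stream, record each item's first-occurrence position via a reversed dict comprehension, sort the items by that position to rank them 1..k, then encode every session by lookup in the resulting rank table.
import Mathlib
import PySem

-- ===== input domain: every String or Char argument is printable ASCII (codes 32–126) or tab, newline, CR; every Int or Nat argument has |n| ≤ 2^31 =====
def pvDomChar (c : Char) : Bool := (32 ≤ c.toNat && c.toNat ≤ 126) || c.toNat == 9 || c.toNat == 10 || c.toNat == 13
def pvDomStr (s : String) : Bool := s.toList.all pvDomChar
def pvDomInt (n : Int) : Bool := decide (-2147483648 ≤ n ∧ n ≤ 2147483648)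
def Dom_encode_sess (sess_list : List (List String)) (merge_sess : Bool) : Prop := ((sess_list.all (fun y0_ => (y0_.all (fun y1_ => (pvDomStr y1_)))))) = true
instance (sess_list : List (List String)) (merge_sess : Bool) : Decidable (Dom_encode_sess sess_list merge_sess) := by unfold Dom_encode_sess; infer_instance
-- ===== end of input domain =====

-- B replaces A's incremental first-seen counter with a global sort-based ranking
-- (first-occurrence positions, then rank by sorting); objective: alternative.
-- Equivalence is claimed for merge_sess = false only (see Pre_).

-- ===== PORT A =====
-- inner loop of A: 'for item in sess: if item not in item2idx: item2idx[item] = idx; idx += 1'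
def pvAddItems (st : PySem.Dict String Int × Int) (sess : List String) :
    PySem.Dict String Int × Int :=
  sess.foldl (fun p item =>
    if p.1.contains item then p else (p.1.insert item p.2, p.2 + 1)) st

-- one iteration of A's outer loop (state: item2idx, encoded_sess_list, idx)
def pvStepA (st : PySem.Dict String Int × List (List Int) × Int) (sess : List String) :
    PySem.Dict String Int × List (List Int) × Int :=
  let p := pvAddItems (st.1, st.2.2) sess
  -- 'item2idx[item]': the key is always present here, so the lookup is '(get? _).getD 0'
  (p.1, st.2.1 ++ [sess.map (fun item => (p.1.get? item).getD 0)], p.2)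

def encode_sess (sess_list : List (List String)) (merge_sess : Bool) :
    List (List Int) × (List (String × Int)) :=
  let st := sess_list.foldl pvStepA (PySem.Dict.empty, [], 1)
  if merge_sess then
    -- merge_sess=True returns a flat list[int] in Python (outside Pre_); represented as [flat]
    ([st.2.1.flatten], st.1.items)
  else (st.2.1, st.1.items)

-- ===== PORT B =====
-- '{item: pos for pos, item in …}': one dict-comprehension insertion
def pvIns (d : PySem.Dict String Int) (p : Int × String) : PySem.Dict String Int :=
  d.insert p.2 p.1

def encode_sess_alt (sess_list : List (List String)) (merge_sess : Bool) :
    List (List Int) × (List (String × Int)) :=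
  let flat := sess_list.flatten
  -- first_pos = {item: pos for pos, item in reversed(list(enumerate(flat)))}
  let first_pos := (PySem.List.enumerate flat 0).reverse.foldl pvIns PySem.Dict.empty
  -- order = sorted(first_pos, key=first_pos.get); every key is present, so .get = getD _ 0
  let order := PySem.List.sorted first_pos.keys (fun k => first_pos.getD k 0) false
  -- item2idx = {item: idx for idx, item in enumerate(order, start=1)}
  let item2idx := (PySem.List.enumerate order 1).foldl pvIns PySem.Dict.empty
  -- [[item2idx[item] for item in sess] for sess in sess_list]; keys always present
  let enc := sess_list.map (fun sess => sess.map (fun item => item2idx.getD item 0))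
  if merge_sess then ([enc.flatten], item2idx.items)
  else (enc, item2idx.items)

-- ===== PRECONDITION & SPEC =====
-- Pre_ excludes merge_sess = True, on which A returns a flat list[int] — not a value of the
-- declared return type List (List Int); A and B agree there too (see cites), it is excluded
-- only because the flat list cannot be stated in the declared type.
def Pre_encode_sess (sess_list : List (List String)) (merge_sess : Bool) : Prop :=
  merge_sess = false
instance (sess_list : List (List String)) (merge_sess : Bool) : Decidable (Pre_encode_sess sess_list merge_sess) := by unfold Pre_encode_sess; infer_instance

def pvWitness_encode_sess : List (List String) × Bool := ([["a", "b", "a"], ["b", "c"]], false)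

def Spec_encode_sess (sess_list : List (List String)) (merge_sess : Bool) (out : List (List Int) × (List (String × Int))) : Prop := out = encode_sess_alt sess_list merge_sess
instance (sess_list : List (List String)) (merge_sess : Bool) (out : List (List Int) × (List (String × Int))) : Decidable (Spec_encode_sess sess_list merge_sess out) := by unfold Spec_encode_sess; infer_instance

-- ===== CLAIM (what is proved, stated in full; the proofs are below) =====
def Claim_equal_encode_sess : Prop := ∀ (sess_list : List (List String)) (merge_sess : Bool), Dom_encode_sess sess_list merge_sess → Pre_encode_sess sess_list merge_sess → Spec_encode_sess sess_list merge_sess (encode_sess sess_list merge_sess)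

-- ===== LEMMAS AND PROOFS =====

-- the spine both proofs meet at: first occurrences of xs not yet in 'seen', in order
def pvNew (seen : List String) : List String → List String
  | [] => []
  | x :: r => if x ∈ seen then pvNew seen r else x :: pvNew (seen ++ [x]) r

theorem mem_pvNew (xs : List String) :
    ∀ (seen : List String) (k : String), k ∈ pvNew seen xs ↔ k ∈ xs ∧ k ∉ seen := by
  induction xs with
  | nil => intro seen k; simp [pvNew]
  | cons x r ih =>
    intro seen k
    by_cases hx : x ∈ seen
    · simp only [pvNew, if_pos hx, ih]
      constructor
      · rintro ⟨hk, hks⟩; exact ⟨List.mem_cons_of_mem _ hk, hks⟩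
      · rintro ⟨hk, hks⟩
        rcases List.mem_cons.mp hk with rfl | hk
        · exact absurd hx hks
        · exact ⟨hk, hks⟩
    · simp only [pvNew, if_neg hx, List.mem_cons, ih, List.mem_append]
      constructor
      · rintro (rfl | ⟨hk, hks⟩)
        · exact ⟨Or.inl rfl, hx⟩
        · exact ⟨Or.inr hk, fun h => hks (Or.inl h)⟩
      · rintro ⟨rfl | hk, hks⟩
        · exact Or.inl rfl
        · by_cases hkx : k = x
          · exact Or.inl hkx
          · exact Or.inr ⟨hk, by simp [hks, hkx]⟩

theorem nodup_pvNew (xs : List String) :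
    ∀ (seen : List String), (pvNew seen xs).Nodup := by
  induction xs with
  | nil => intro seen; simp [pvNew]
  | cons x r ih =>
    intro seen
    by_cases hx : x ∈ seen
    · simpa [pvNew, hx] using ih seen
    · simp only [pvNew, if_neg hx]
      refine List.nodup_cons.mpr ⟨?_, ih (seen ++ [x])⟩
      intro hmem
      exact ((mem_pvNew r _ x).mp hmem).2 (by simp)

theorem pairwise_pvNew (xs : List String) :
    ∀ (seen : List String),
      (pvNew seen xs).Pairwise (fun a b => xs.idxOf a < xs.idxOf b) := by
  induction xs with
  | nil => intro seen; simp [pvNew]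
  | cons x r ih =>
    intro seen
    by_cases hx : x ∈ seen
    · simp only [pvNew, if_pos hx]
      refine ((ih seen).imp_of_mem ?_)
      intro a b ha hb hlt
      have hax : a ≠ x := fun h => ((mem_pvNew r seen a).mp ha).2 (h ▸ hx)
      have hbx : b ≠ x := fun h => ((mem_pvNew r seen b).mp hb).2 (h ▸ hx)
      simpa [List.idxOf_cons, beq_iff_eq, Ne.symm hax, Ne.symm hbx] using
        Nat.succ_lt_succ hlt
    · simp only [pvNew, if_neg hx]
      refine List.pairwise_cons.mpr ⟨?_, ?_⟩
      · intro b hb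
        have hbx : b ≠ x := fun h =>
          ((mem_pvNew r _ b).mp hb).2 (by simp [h])
        simp [Ne.symm hbx]
      · refine ((ih (seen ++ [x])).imp_of_mem ?_)
        intro a b ha hb hlt
        have hax : a ≠ x := fun h => ((mem_pvNew r _ a).mp ha).2 (by simp [h])
        have hbx : b ≠ x := fun h => ((mem_pvNew r _ b).mp hb).2 (by simp [h])
        simpa [List.idxOf_cons, beq_iff_eq, Ne.symm hax, Ne.symm hbx] using
          Nat.succ_lt_succ hlt

-- ===== A-side lemmas =====

-- A's insert-if-absent loop never changes the binding of a key already present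
theorem pvAddItems_get?_mono (sess : List String) :
    ∀ (d : PySem.Dict String Int) (i : Int) (k : String), d.contains k = true →
      (pvAddItems (d, i) sess).1.get? k = d.get? k := by
  induction sess with
  | nil => intro d i k _; rfl
  | cons item rest ih =>
    intro d i k hk
    by_cases h : d.contains item = true
    · simpa [pvAddItems, List.foldl, h] using ih d i k hk
    · have hne : k ≠ item := by
        intro he; rw [he] at hk; simp [hk] at h
      have hk' : (d.insert item i).contains k = true := by
        simp [PySem.Dict.contains_insert, hk]
      have := ih (d.insert item i) (i + 1) k hk'
      simp only [pvAddItems, List.foldl] at *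
      simp [h, this, PySem.Dict.get?_insert_of_ne _ _ hne]

theorem pvAddItems_contains_mono (sess : List String) :
    ∀ (d : PySem.Dict String Int) (i : Int) (k : String), d.contains k = true →
      (pvAddItems (d, i) sess).1.contains k = true := by
  induction sess with
  | nil => intro d i k hk; exact hk
  | cons item rest ih =>
    intro d i k hk
    by_cases h : d.contains item = true
    · simpa [pvAddItems, List.foldl, h] using ih d i k hk
    · have hk' : (d.insert item i).contains k = true := by
        simp [PySem.Dict.contains_insert, hk]
      simpa [pvAddItems, List.foldl, h] using ih (d.insert item i) (i + 1) k hk'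

theorem pvAddItems_contains_of_mem (sess : List String) :
    ∀ (d : PySem.Dict String Int) (i : Int) (k : String), k ∈ sess →
      (pvAddItems (d, i) sess).1.contains k = true := by
  induction sess with
  | nil => intro d i k hk; simp at hk
  | cons item rest ih =>
    intro d i k hk
    rcases List.mem_cons.mp hk with rfl | hk
    · by_cases h : d.contains k = true
      · simpa [pvAddItems, List.foldl, h] using pvAddItems_contains_mono rest d i k h
      · have hb : d.contains k = false := by simpa using h
        have : (d.insert k i).contains k = true := PySem.Dict.contains_insert_self _ _ _
        simpa [pvAddItems, List.foldl, hb] using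
          pvAddItems_contains_mono rest (d.insert k i) (i + 1) k this
    · by_cases h : d.contains item = true
      · simpa [pvAddItems, List.foldl, h] using ih d i k hk
      · simpa [pvAddItems, List.foldl, h] using ih (d.insert item i) (i + 1) k hk

-- A's dict loop appends the fresh first-occurrences with consecutive ids
theorem pvAddItems_items (xs : List String) :
    ∀ (d : PySem.Dict String Int) (i : Int), d.keys.Nodup →
      (pvAddItems (d, i) xs).1.items
        = d.items ++ (PySem.List.enumerate (pvNew d.keys xs) i).map (fun p => (p.2, p.1)) ∧
      (pvAddItems (d, i) xs).1.keys.Nodup := by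
  induction xs with
  | nil => intro d i hd; simp [pvAddItems, pvNew, PySem.List.enumerate_nil, hd]
  | cons x r ih =>
    intro d i hd
    by_cases h : d.contains x = true
    · have hxk : x ∈ d.keys := (PySem.Dict.contains_iff_mem_keys d x).mp h
      have := ih d i hd
      simpa [pvAddItems, List.foldl, h, pvNew, hxk] using this
    · have hb : d.contains x = false := by simpa using h
      have hxk : x ∉ d.keys := fun hm => by
        simp [(PySem.Dict.contains_iff_mem_keys d x).mpr hm] at hb
      have hkeys : (d.insert x i).keys = d.keys ++ [x] :=
        PySem.Dict.keys_insert_of_not_contains d i hb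
      have hnd' : (d.insert x i).keys.Nodup := PySem.Dict.nodup_keys_insert _ _ _ hd
      obtain ⟨h1, h2⟩ := ih (d.insert x i) (i + 1) hnd'
      refine ⟨?_, by simpa [pvAddItems, List.foldl, h] using h2⟩
      have hitems : (d.insert x i).items = d.items ++ [(x, i)] :=
        PySem.Dict.items_insert_of_not_contains d i hb
      simp only [pvAddItems, List.foldl, h, Bool.false_eq_true, if_false] at h1 ⊢
      rw [h1, hitems, hkeys]
      simp [pvNew, hxk, PySem.List.enumerate_cons]

-- A's outer loop: dict part is pvAddItems over the flattened stream, and every encoded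
-- entry can be read off the FINAL dict (bindings persist)
theorem stepA_decomp (sl : List (List String)) :
    ∀ (d : PySem.Dict String Int) (enc : List (List Int)) (i : Int),
      sl.foldl pvStepA (d, enc, i)
        = ((pvAddItems (d, i) sl.flatten).1,
           enc ++ sl.map (fun sess => sess.map (fun item =>
             ((pvAddItems (d, i) sl.flatten).1.get? item).getD 0)),
           (pvAddItems (d, i) sl.flatten).2) := by
  induction sl with
  | nil => intro d enc i; simp [pvAddItems]
  | cons sess rest ih =>
    intro d enc i
    have hsplit : (sess :: rest).flatten = sess ++ rest.flatten := rfl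
    have hcomp : pvAddItems (d, i) (sess ++ rest.flatten)
        = pvAddItems (pvAddItems (d, i) sess) rest.flatten := by
      simp [pvAddItems, List.foldl_append]
    have hstep : pvStepA (d, enc, i) sess
        = ((pvAddItems (d, i) sess).1,
           enc ++ [sess.map (fun item => ((pvAddItems (d, i) sess).1.get? item).getD 0)],
           (pvAddItems (d, i) sess).2) := rfl
    have hlook : sess.map (fun item => ((pvAddItems (d, i) sess).1.get? item).getD 0)
        = sess.map (fun item =>
            ((pvAddItems (d, i) (sess ++ rest.flatten)).1.get? item).getD 0) := by
      refine List.map_congr_left ?_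
      intro item hmem
      rw [hcomp]
      have hc : (pvAddItems (d, i) sess).1.contains item = true :=
        pvAddItems_contains_of_mem sess d i item hmem
      rw [show pvAddItems (pvAddItems (d, i) sess) rest.flatten
            = pvAddItems ((pvAddItems (d, i) sess).1, (pvAddItems (d, i) sess).2)
              rest.flatten from rfl,
        pvAddItems_get?_mono rest.flatten _ _ item hc]
    simp only [List.foldl_cons, hstep, hsplit]
    rw [ih]
    simp only [hcomp, List.map_cons, List.append_assoc, List.singleton_append, hlook]

-- ===== B-side lemmas =====

-- the reversed dict-comprehension: first match in the forward list wins
theorem foldl_pvIns_reverse_get? (l : List (Int × String)) :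
    ∀ (d : PySem.Dict String Int) (k : String),
      ((l.reverse.foldl pvIns d).get? k)
        = match l.find? (fun p => p.2 == k) with
          | some p => some p.1
          | none => d.get? k := by
  induction l with
  | nil => intro d k; simp
  | cons a t ih =>
    intro d k
    have hrev : (a :: t).reverse = t.reverse ++ [a] := by simp
    rw [hrev, List.foldl_append]
    simp only [List.foldl_cons, List.foldl_nil, pvIns, List.find?_cons]
    by_cases hk : a.2 = k
    · subst hk
      simp [PySem.Dict.get?_insert_self]
    · have : (a.2 == k) = false := by simp [hk]
      rw [this]
      rw [PySem.Dict.get?_insert_of_ne _ _ (fun h => hk h.symm)]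
      exact ih d k

theorem find?_enumerate_snd (xs : List String) :
    ∀ (s : Int) (k : String), k ∈ xs →
      (PySem.List.enumerate xs s).find? (fun p => p.2 == k)
        = some (s + (xs.idxOf k : Int), k) := by
  induction xs with
  | nil => intro s k hk; simp at hk
  | cons x r ih =>
    intro s k hk
    rw [PySem.List.enumerate_cons]
    by_cases hx : x = k
    · subst hx
      simp
    · have hfalse : ((s, x).2 == k) = false := by simp [hx]
      have hkr : k ∈ r := by
        rcases List.mem_cons.mp hk with h | h
        · exact absurd h.symm hx
        · exact h
      rw [List.find?_cons, hfalse]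
      rw [ih (s + 1) k hkr]
      have : (s + 1) + ((r.idxOf k : Nat) : Int) = s + (((x :: r).idxOf k : Nat) : Int) := by
        rw [List.idxOf_cons]
        have : (x == k) = false := by simp [hx]
        rw [this]
        simp only [cond_false]
        push_cast
        ring
      rw [this]

-- the rank dict {item: idx for idx, item in enumerate(order, 1)} over Nodup keys
theorem foldl_pvIns_enumerate_items (order : List String) (h : order.Nodup) :
    ((PySem.List.enumerate order 1).foldl pvIns PySem.Dict.empty).items
      = (PySem.List.enumerate order 1).map (fun p => (p.2, p.1)) := by
  have hfresh : ∀ a ∈ PySem.List.enumerate order 1,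
      (PySem.Dict.empty : PySem.Dict String Int).contains a.2 = false := by
    intro a _; simp [PySem.Dict.contains_empty]
  have hnodup : ((PySem.List.enumerate order 1).map (fun p => p.2)).Nodup := by
    rw [PySem.List.map_snd_enumerate]
    exact h
  have := PySem.Dict.items_foldl_insert_fresh (l := PySem.List.enumerate order 1)
    (k := fun p => p.2) (v := fun p => p.1) (d := PySem.Dict.empty) hfresh hnodup
  simpa [pvIns] using this

-- ===== the meet: both dicts are pvNew [] flat with ids 1.. =====

theorem dicts_eq (flat : List String) :
    (pvAddItems (PySem.Dict.empty, 1) flat).1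
      = (PySem.List.enumerate
          (PySem.List.sorted
            ((PySem.List.enumerate flat 0).reverse.foldl pvIns PySem.Dict.empty).keys
            (fun k => ((PySem.List.enumerate flat 0).reverse.foldl pvIns
                PySem.Dict.empty).getD k 0) false) 1).foldl pvIns PySem.Dict.empty := by
  set fp := (PySem.List.enumerate flat 0).reverse.foldl pvIns PySem.Dict.empty with hfp
  -- first_pos's keys: the distinct elements of flat (in some order)
  have hkeys : fp.keys = PySem.Set.ofList flat.reverse := by
    have h := PySem.Dict.keys_foldl_insert_key (ν := Int)
      ((PySem.List.enumerate flat 0).reverse) (fun q : Int × String => q.2)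
      (fun _ q => q.1) PySem.Dict.empty
    rw [show (PySem.List.enumerate flat 0).reverse.map (fun q : Int × String => q.2)
          = flat.reverse by rw [List.map_reverse, PySem.List.map_snd_enumerate],
      PySem.Dict.keys_empty, PySem.Set.update_nil_left] at h
    exact h
  have hmemkeys : ∀ k, k ∈ fp.keys ↔ k ∈ flat := by
    intro k
    rw [hkeys, PySem.Set.mem_ofList, List.mem_reverse]
  have hnodupkeys : fp.keys.Nodup := by
    rw [hkeys]; exact PySem.Set.nodup_ofList _
  -- first_pos's values: the first-occurrence position in flat
  have hval : ∀ k, k ∈ flat → fp.getD k 0 = ((flat.idxOf k : Nat) : Int) := by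
    intro k hk
    rw [hfp, PySem.Dict.getD_eq_get?_getD, foldl_pvIns_reverse_get?,
      find?_enumerate_snd flat 0 k hk]
    simp
  -- sorted(first_pos, key=first_pos.get) is exactly the first-occurrence order pvNew [] flat
  have horder : PySem.List.sorted fp.keys (fun k => fp.getD k 0) false = pvNew [] flat := by
    refine PySem.List.sorted_eq_of_perm_of_pairwise_lt _ _ _ ?_ ?_
    · refine (List.perm_ext_iff_of_nodup (nodup_pvNew flat []) hnodupkeys).mpr ?_
      intro a
      rw [mem_pvNew, hmemkeys]
      simp
    · refine ((pairwise_pvNew flat []).imp_of_mem ?_)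
      intro a b ha hb hlt
      have ha' : a ∈ flat := ((mem_pvNew flat [] a).mp ha).1
      have hb' : b ∈ flat := ((mem_pvNew flat [] b).mp hb).1
      rw [hval a ha', hval b hb']
      exact_mod_cast hlt
  rw [horder]
  -- both dicts now have items (enumerate (pvNew [] flat) 1).map swap
  apply PySem.Dict.ext
  rw [foldl_pvIns_enumerate_items _ (nodup_pvNew flat [])]
  have := pvAddItems_items flat PySem.Dict.empty 1 (by simp [PySem.Dict.keys_empty])
  rw [this.1]
  rw [show (PySem.Dict.empty : PySem.Dict String Int).items = [] from rfl,
    show (PySem.Dict.empty : PySem.Dict String Int).keys = [] from rfl,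
    List.nil_append]

-- ===== VERDICT (by name: the statement is the Claim_ definition above) =====
theorem encode_sess_spec : Claim_equal_encode_sess := by
  intro sl ms _ hpre
  unfold Pre_encode_sess at hpre
  subst hpre
  unfold Spec_encode_sess encode_sess encode_sess_alt
  simp only [Bool.false_eq_true, if_false]
  rw [stepA_decomp, dicts_eq sl.flatten]
  simp only [← PySem.Dict.getD_eq_get?_getD, List.nil_append]
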